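-- pv_equiv track=rewrite | github.com/sfu-arch/TensorBricks | TB-scheduler/dnn_schedules/per_layer/sram_traffic.py | gen_filter_trace
-- ===== SOURCE A (Python) =====
-- def gen_filter_trace(
--         cycle=0,
--         num_rows=4, num_cols=4,
--         filt_h=3, filt_w=3, num_channels=3,
--         col_addr=[],
--         parallel_window=1,
--         filters_this_fold=4
-- ):
--
--     # There is no data from the left side till the weights are fed in
--     # This prefix is to mark the blanks
--     prefix = ""
--     for r in range(num_rows):
--         prefix += ", "
--
--     # Calculate the convolution window size
--     r2c = filt_h * filt_w * num_channels
--
--     rem = filters_this_fold  # Track the number of filters yet to process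
--
--     # For each wrap around
--     for w in range(parallel_window):
--         # Number of active columns in this wrap
--         cols = min(num_cols, rem)
--         rem -= cols
--
--         # For each row in the window
--         cycle += r2c
--     return cycle
-- ===== SOURCE B (Python) =====
-- def gen_filter_trace(
--         cycle=0,
--         num_rows=4, num_cols=4,
--         filt_h=3, filt_w=3, num_channels=3,
--         col_addr=[],
--         parallel_window=1,
--         filters_this_fold=4
-- ):
--     # Closed form: each of the parallel_window iterations adds one
--     # convolution-window cost filt_h*filt_w*num_channels to cycle.
--     return cycle + filt_h * filt_w * num_channels * max(parallel_window, 0)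
-- ===== Notes on version B (the rewrite author's own statement) =====
-- stated objective: faster
-- what changed: Replaced the prefix-building loop and the per-window accumulation (with its unused rem/cols bookkeeping) by the direct closed form cycle + filt_h*filt_w*num_channels*max(parallel_window,0).
import Mathlib
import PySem

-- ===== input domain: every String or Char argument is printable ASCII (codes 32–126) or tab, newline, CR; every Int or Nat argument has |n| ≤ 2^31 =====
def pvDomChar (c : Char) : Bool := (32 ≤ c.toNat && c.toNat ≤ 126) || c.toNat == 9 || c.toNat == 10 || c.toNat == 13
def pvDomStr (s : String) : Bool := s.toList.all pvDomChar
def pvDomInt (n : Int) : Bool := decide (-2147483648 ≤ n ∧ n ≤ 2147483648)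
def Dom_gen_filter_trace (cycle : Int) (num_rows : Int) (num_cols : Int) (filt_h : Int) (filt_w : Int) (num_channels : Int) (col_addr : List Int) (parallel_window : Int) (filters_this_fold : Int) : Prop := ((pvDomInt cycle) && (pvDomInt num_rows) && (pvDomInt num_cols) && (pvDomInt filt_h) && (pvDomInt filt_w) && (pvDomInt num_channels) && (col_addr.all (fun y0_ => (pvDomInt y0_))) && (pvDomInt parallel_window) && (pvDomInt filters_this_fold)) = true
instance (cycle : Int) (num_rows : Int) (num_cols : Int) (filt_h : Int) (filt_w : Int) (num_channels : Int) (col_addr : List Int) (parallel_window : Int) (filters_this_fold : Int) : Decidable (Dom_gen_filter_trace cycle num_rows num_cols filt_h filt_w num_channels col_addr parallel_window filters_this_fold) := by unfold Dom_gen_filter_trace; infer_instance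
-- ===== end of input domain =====

-- ===== PORT A =====
-- Literal transliteration of A: builds the (unused) prefix string, then folds
-- over range(parallel_window) carrying (cycle, rem) exactly as the Python loop does.
def gen_filter_trace (cycle : Int) (num_rows : Int) (num_cols : Int) (filt_h : Int) (filt_w : Int) (num_channels : Int) (col_addr : List Int) (parallel_window : Int) (filters_this_fold : Int) : Int :=
  let _prefix : List Char :=
    (PySem.List.pyRange 0 num_rows 1).foldl (fun s _ => s ++ (", ".toList)) []
  let r2c := filt_h * filt_w * num_channels
  let st :=
    (PySem.List.pyRange 0 parallel_window 1).foldl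
      (fun (st : Int × Int) _ =>
        let cols := min num_cols st.2
        let rem := st.2 - cols
        (st.1 + r2c, rem))
      (cycle, filters_this_fold)
  st.1

-- ===== PORT B =====
-- B: closed form, one expression (simpler; drops the dead prefix/rem bookkeeping).
def gen_filter_trace_alt (cycle : Int) (num_rows : Int) (num_cols : Int) (filt_h : Int) (filt_w : Int) (num_channels : Int) (col_addr : List Int) (parallel_window : Int) (filters_this_fold : Int) : Int :=
  cycle + filt_h * filt_w * num_channels * max parallel_window 0

-- ===== PRECONDITION & SPEC =====
def Spec_gen_filter_trace (cycle : Int) (num_rows : Int) (num_cols : Int) (filt_h : Int) (filt_w : Int) (num_channels : Int) (col_addr : List Int) (parallel_window : Int) (filters_this_fold : Int) (out : Int) : Prop := out = gen_filter_trace_alt cycle num_rows num_cols filt_h filt_w num_channels col_addr parallel_window filters_this_fold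
instance (cycle : Int) (num_rows : Int) (num_cols : Int) (filt_h : Int) (filt_w : Int) (num_channels : Int) (col_addr : List Int) (parallel_window : Int) (filters_this_fold : Int) (out : Int) : Decidable (Spec_gen_filter_trace cycle num_rows num_cols filt_h filt_w num_channels col_addr parallel_window filters_this_fold out) := by unfold Spec_gen_filter_trace; infer_instance

-- ===== CLAIM (what is proved, stated in full; the proofs are below) =====
def Claim_equal_gen_filter_trace : Prop := ∀ (cycle : Int) (num_rows : Int) (num_cols : Int) (filt_h : Int) (filt_w : Int) (num_channels : Int) (col_addr : List Int) (parallel_window : Int) (filters_this_fold : Int), Dom_gen_filter_trace cycle num_rows num_cols filt_h filt_w num_channels col_addr parallel_window filters_this_fold → Spec_gen_filter_trace cycle num_rows num_cols filt_h filt_w num_channels col_addr parallel_window filters_this_fold (gen_filter_trace cycle num_rows num_cols filt_h filt_w num_channels col_addr parallel_window filters_this_fold)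

-- ===== LEMMAS AND PROOFS =====

-- ===== VERDICT (by name: the statement is the Claim_ definition above) =====
-- The A-loop adds r2c once per iteration, regardless of the element and of rem.
theorem foldl_fst_add_const (r2c num_cols : Int) (l : List Int) :
    ∀ (c rem : Int),
      (l.foldl (fun (st : Int × Int) _ =>
        let cols := min num_cols st.2
        let rem := st.2 - cols
        (st.1 + r2c, rem)) (c, rem)).1 = c + r2c * l.length := by
  induction l with
  | nil => intro c rem; simp
  | cons x xs ih =>
      intro c rem
      simp only [List.foldl_cons, ih]
      simp [List.length_cons]
      push_cast
      ring

theorem gen_filter_trace_spec : Claim_equal_gen_filter_trace := by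
  intro cycle num_rows num_cols filt_h filt_w num_channels col_addr parallel_window filters_this_fold _
  unfold Spec_gen_filter_trace gen_filter_trace gen_filter_trace_alt
  rw [foldl_fst_add_const]
  rw [PySem.List.length_pyRange_one]
  have h : ((parallel_window - 0).toNat : Int) = max parallel_window 0 := by omega
  rw [h]
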